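-- pv_equiv track=rewrite | github.com/jannikw/aoc-2019 | day03/part2.py | wire_segments
-- ===== SOURCE A (Python) =====
-- def wire_segments(directions):
--     x = 0
--     y = 0
--     segments = []
--     steps = 0
--
--     for direction in directions:
--         start = (x, y)
--
--         if direction[0] == "U":
--             y = y + direction[1]
--         elif direction[0] == "R":
--             x = x + direction[1]
--         elif direction[0] == "D":
--             y = y - direction[1]
--         elif direction[0] == "L":
--             x = x - direction[1]
--
--         steps += direction[1]
--         end = (x, y)
--         segments.append((start, end, steps))
--
--     return segments
-- ===== SOURCE B (Python) =====
-- def wire_segments(directions):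
--     def scan(vals):
--         out = [0]
--         acc = 0
--         for v in vals:
--             acc += v
--             out.append(acc)
--         return out
--
--     xs = scan(d[1] if d[0] == "R" else -d[1] if d[0] == "L" else 0 for d in directions)
--     ys = scan(d[1] if d[0] == "U" else -d[1] if d[0] == "D" else 0 for d in directions)
--     ss = scan(d[1] for d in directions)
--     return [((xs[i], ys[i]), (xs[i + 1], ys[i + 1]), ss[i + 1])
--             for i in range(len(directions))]
-- ===== Notes on version B (the rewrite author's own statement) =====
-- stated objective: alternative
-- what changed: Replaces A's single loop threading mutable (x, y, steps) state and appending segments by three independent prefix-sum arrays (signed x-deltas, signed y-deltas, step counts) built first and then paired off consecutively in a separate indexed pass.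
import Mathlib
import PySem

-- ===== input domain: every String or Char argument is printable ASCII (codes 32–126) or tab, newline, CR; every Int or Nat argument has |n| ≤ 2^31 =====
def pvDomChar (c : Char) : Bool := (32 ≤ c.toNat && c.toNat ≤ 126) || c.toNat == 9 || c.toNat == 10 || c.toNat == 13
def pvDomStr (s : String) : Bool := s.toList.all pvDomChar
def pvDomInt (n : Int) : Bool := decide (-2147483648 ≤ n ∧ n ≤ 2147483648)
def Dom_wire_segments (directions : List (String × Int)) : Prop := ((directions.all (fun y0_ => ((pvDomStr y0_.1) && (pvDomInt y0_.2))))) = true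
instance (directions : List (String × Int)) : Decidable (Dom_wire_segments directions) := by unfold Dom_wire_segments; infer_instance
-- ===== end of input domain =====

-- B replaces A's single mutable-state loop by three prefix-sum arrays paired off in an indexed pass (alternative decomposition, same cost).

-- ===== PORT A =====
-- one loop threading (x, y, steps, segments); direction[0]/direction[1] are the tuple components
def wire_segments (directions : List (String × Int)) : List ((Int × Int) × (Int × Int) × Int) :=
  (directions.foldl
    (fun (st : Int × Int × Int × List ((Int × Int) × (Int × Int) × Int)) d =>
      let x := st.1
      let y := st.2.1
      let steps := st.2.2.1
      let segs := st.2.2.2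
      let start := (x, y)
      let c := d.1
      let p : Int × Int :=
        if c = "U" then (x, y + d.2)
        else if c = "R" then (x + d.2, y)
        else if c = "D" then (x, y - d.2)
        else if c = "L" then (x - d.2, y)
        else (x, y)
      let steps := steps + d.2
      (p.1, p.2, steps, segs ++ [(start, (p.1, p.2), steps)]))
    (0, 0, 0, [])).2.2.2

-- ===== PORT B =====
-- helper scan: out = [0]; acc = 0; for v: acc += v; out.append(acc)
def pvScan (vals : List Int) : List Int :=
  (vals.foldl (fun (p : List Int × Int) v => (p.1 ++ [p.2 + v], p.2 + v)) ([0], 0)).1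

def pvDx (d : String × Int) : Int :=
  if d.1 = "R" then d.2
  else if d.1 = "L" then -d.2 else 0

def pvDy (d : String × Int) : Int :=
  if d.1 = "U" then d.2
  else if d.1 = "D" then -d.2 else 0

def wire_segments_alt (directions : List (String × Int)) : List ((Int × Int) × (Int × Int) × Int) :=
  let xs := pvScan (directions.map pvDx)
  let ys := pvScan (directions.map pvDy)
  let ss := pvScan (directions.map (·.2))
  (List.range directions.length).map (fun i =>
    ((xs.getD i 0, ys.getD i 0), (xs.getD (i + 1) 0, ys.getD (i + 1) 0), ss.getD (i + 1) 0))

-- ===== PRECONDITION & SPEC =====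
def Spec_wire_segments (directions : List (String × Int)) (out : List ((Int × Int) × (Int × Int) × Int)) : Prop := out = wire_segments_alt directions
instance (directions : List (String × Int)) (out : List ((Int × Int) × (Int × Int) × Int)) : Decidable (Spec_wire_segments directions out) := by unfold Spec_wire_segments; infer_instance

-- ===== CLAIM (what is proved, stated in full; the proofs are below) =====
def Claim_equal_wire_segments : Prop := ∀ (directions : List (String × Int)), Dom_wire_segments directions → Spec_wire_segments directions (wire_segments directions)

-- ===== LEMMAS AND PROOFS =====

-- common reference: structural recursion producing the segment list
def segRec (x y s : Int) : List (String × Int) → List ((Int × Int) × (Int × Int) × Int)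
  | [] => []
  | d :: ds => ((x, y), (x + pvDx d, y + pvDy d), s + d.2) :: segRec (x + pvDx d) (y + pvDy d) (s + d.2) ds

lemma step_pos (x y : Int) (d : String × Int) :
    (if d.1 = "U" then (x, y + d.2)
     else if d.1 = "R" then (x + d.2, y)
     else if d.1 = "D" then (x, y - d.2)
     else if d.1 = "L" then (x - d.2, y)
     else (x, y)) = (x + pvDx d, y + pvDy d) := by
  unfold pvDx pvDy
  split_ifs <;>
    simp_all <;> ring

lemma foldA (ds : List (String × Int)) :
    ∀ (x y s : Int) (acc : List ((Int × Int) × (Int × Int) × Int)),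
    (ds.foldl
      (fun (st : Int × Int × Int × List ((Int × Int) × (Int × Int) × Int)) d =>
        let x := st.1
        let y := st.2.1
        let steps := st.2.2.1
        let segs := st.2.2.2
        let start := (x, y)
        let c := d.1
        let p : Int × Int :=
          if c = "U" then (x, y + d.2)
          else if c = "R" then (x + d.2, y)
          else if c = "D" then (x, y - d.2)
          else if c = "L" then (x - d.2, y)
          else (x, y)
        let steps := steps + d.2
        (p.1, p.2, steps, segs ++ [(start, (p.1, p.2), steps)]))
      (x, y, s, acc)).2.2.2 = acc ++ segRec x y s ds := by
  induction ds with
  | nil => intro x y s acc; simp [segRec]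
  | cons d ds ih =>
    intro x y s acc
    simp only [List.foldl_cons]
    rw [show (if d.1 = "U" then (x, y + d.2)
      else if d.1 = "R" then (x + d.2, y)
      else if d.1 = "D" then (x, y - d.2)
      else if d.1 = "L" then (x - d.2, y)
      else (x, y)) = (x + pvDx d, y + pvDy d) from step_pos x y d]
    rw [ih]
    simp [segRec]

-- reference scan
def scanFrom (a : Int) : List Int → List Int
  | [] => [a]
  | v :: vs => a :: scanFrom (a + v) vs

lemma scan_fold (vals : List Int) :
    ∀ (out : List Int) (acc : Int),
    (vals.foldl (fun (p : List Int × Int) v => (p.1 ++ [p.2 + v], p.2 + v)) (out ++ [acc], acc)).1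
      = out ++ scanFrom acc vals := by
  induction vals with
  | nil => intro out acc; simp [scanFrom]
  | cons v vs ih =>
    intro out acc
    simp only [List.foldl_cons]
    have := ih (out ++ [acc]) (acc + v)
    simpa [scanFrom] using this

lemma pvScan_eq (vals : List Int) : pvScan vals = scanFrom 0 vals := by
  have := scan_fold vals [] 0
  simpa [pvScan] using this

lemma scanFrom_head? (a : Int) (vs : List Int) : (scanFrom a vs)[0]? = some a := by
  cases vs <;> simp [scanFrom]

lemma mainGen (ds : List (String × Int)) :
    ∀ (x y s : Int),
    (List.range ds.length).map (fun i =>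
      (((scanFrom x (ds.map pvDx)).getD i 0, (scanFrom y (ds.map pvDy)).getD i 0),
       ((scanFrom x (ds.map pvDx)).getD (i + 1) 0, (scanFrom y (ds.map pvDy)).getD (i + 1) 0),
       (scanFrom s (ds.map (·.2))).getD (i + 1) 0))
      = segRec x y s ds := by
  induction ds with
  | nil => intro x y s; simp [segRec]
  | cons d ds ih =>
    intro x y s
    simp only [List.map_cons, List.length_cons, scanFrom, List.range_succ_eq_map,
      List.map_map, List.map_cons]
    rw [segRec]
    congr 1
    · simp [scanFrom_head?]
    · rw [← ih (x + pvDx d) (y + pvDy d) (s + d.2)]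
      apply List.map_congr_left
      intro i _
      simp [Function.comp]

lemma alt_eq_segRec (ds : List (String × Int)) : wire_segments_alt ds = segRec 0 0 0 ds := by
  unfold wire_segments_alt
  simp only [pvScan_eq]
  exact mainGen ds 0 0 0

-- ===== VERDICT (by name: the statement is the Claim_ definition above) =====
theorem wire_segments_spec : Claim_equal_wire_segments := by
  intro ds _
  unfold Spec_wire_segments
  rw [alt_eq_segRec]
  have := foldA ds 0 0 0 []
  simpa [wire_segments] using this
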